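-- pv_equiv track=rewrite | github.com/piXelz00/neetcode-submissions-yoxuutll | Data Structures & Algorithms/string-encode-and-decode/submission-1.py | split_by_delimiter
-- ===== SOURCE A (Python) =====
-- from typing import List
--
-- def split_by_delimiter(text, delimiter) -> List[str]:
--     current_token = ""
--     tokens = []
--     for char in text:
--         if char == delimiter:
--             tokens.append(current_token)
--             current_token = ""
--         else:
--             current_token += char
--     return tokens
-- ===== SOURCE B (Python) =====
-- def split_by_delimiter(text, delimiter):
--     positions = [i for i, ch in enumerate(text) if ch == delimiter]
--     tokens = []
--     start = 0
--     for i in positions: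
--         tokens.append(text[start:i])
--         start = i + 1
--     return tokens
-- ===== Notes on version B (the rewrite author's own statement) =====
-- stated objective: alternative
-- what changed: B first builds the list of all delimiter positions via enumerate, then a second pass slices text between consecutive positions, instead of A's single pass accumulating characters into a growing current token.
import Mathlib
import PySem

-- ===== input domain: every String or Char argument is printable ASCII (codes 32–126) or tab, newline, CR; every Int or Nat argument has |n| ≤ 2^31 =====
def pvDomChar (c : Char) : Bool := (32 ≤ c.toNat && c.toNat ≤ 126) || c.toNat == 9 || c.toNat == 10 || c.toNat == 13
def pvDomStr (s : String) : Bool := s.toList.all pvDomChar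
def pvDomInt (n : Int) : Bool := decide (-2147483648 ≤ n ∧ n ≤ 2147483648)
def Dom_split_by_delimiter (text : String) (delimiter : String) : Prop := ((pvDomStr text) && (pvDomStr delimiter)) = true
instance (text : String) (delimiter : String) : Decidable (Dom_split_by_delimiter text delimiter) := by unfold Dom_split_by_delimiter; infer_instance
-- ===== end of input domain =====

-- B replaces A's one-pass character accumulator by an index-of-delimiters pass followed by a slicing pass (alternative decomposition, same cost).

-- ===== PORT A =====
-- state: (current_token as its list of characters, tokens); 'char == delimiter' is the
-- one-character string made of char compared with delimiter, exactly as in Python.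
def split_by_delimiter (text : String) (delimiter : String) : List String :=
  (text.toList.foldl
    (fun (st : List Char × List String) (c : Char) =>
      if String.mk [c] = delimiter then ([], st.2 ++ [String.mk st.1])
      else (st.1 ++ [c], st.2))
    ([], [])).2

-- ===== PORT B =====
-- positions = [i for i, ch in enumerate(text) if ch == delimiter]; then slice between them.
def split_by_delimiter_alt (text : String) (delimiter : String) : List String :=
  let cs := text.toList
  let positions : List Int :=
    ((PySem.List.enumerate cs).filter (fun p => String.mk [p.2] = delimiter)).map (·.1)
  (positions.foldl
    (fun (st : List String × Int) (i : Int) =>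
      (st.1 ++ [String.mk (PySem.List.slice cs (some st.2) (some i))], i + 1))
    ([], 0)).1

-- ===== PRECONDITION & SPEC =====
def Spec_split_by_delimiter (text : String) (delimiter : String) (out : List String) : Prop := out = split_by_delimiter_alt text delimiter
instance (text : String) (delimiter : String) (out : List String) : Decidable (Spec_split_by_delimiter text delimiter out) := by unfold Spec_split_by_delimiter; infer_instance

-- ===== CLAIM (what is proved, stated in full; the proofs are below) =====
def Claim_equal_split_by_delimiter : Prop := ∀ (text : String) (delimiter : String), Dom_split_by_delimiter text delimiter → Spec_split_by_delimiter text delimiter (split_by_delimiter text delimiter)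

-- ===== LEMMAS AND PROOFS =====

-- common recursive characterisation: tokens emitted while scanning l with pending prefix cur
def gTok (delim : String) : List Char → List Char → List String
  | _, [] => []
  | cur, c :: l => if String.mk [c] = delim then String.mk cur :: gTok delim [] l
                   else gTok delim (cur ++ [c]) l

theorem foldA_eq_gTok (delim : String) (l : List Char) :
    ∀ (cur : List Char) (toks : List String),
      (l.foldl
        (fun (st : List Char × List String) (c : Char) =>
          if String.mk [c] = delim then ([], st.2 ++ [String.mk st.1])
          else (st.1 ++ [c], st.2))
        (cur, toks)).2 = toks ++ gTok delim cur l := by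
  induction l with
  | nil => intro cur toks; simp [gTok]
  | cons c l ih =>
    intro cur toks
    by_cases h : String.mk [c] = delim
    · simp [List.foldl_cons, gTok, h, ih]
    · simp [List.foldl_cons, gTok, h, ih]

theorem foldB_eq_gTok (delim : String) (cs : List Char) (l : List Char) :
    ∀ (n s : Nat) (out : List String), cs.drop n = l → s ≤ n →
      ((((PySem.List.enumerate l ((n : Nat) : Int)).filter
          (fun p => String.mk [p.2] = delim)).map (·.1)).foldl
        (fun (st : List String × Int) (i : Int) =>
          (st.1 ++ [String.mk (PySem.List.slice cs (some st.2) (some i))], i + 1))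
        (out, ((s : Nat) : Int))).1
      = out ++ gTok delim ((cs.drop s).take (n - s)) l := by
  induction l with
  | nil => intro n s out _ _; simp [PySem.List.enumerate_nil, gTok]
  | cons c l ih =>
    intro n s out hdrop hle
    have hdrop' : cs.drop (n + 1) = l := by
      have h2 : (cs.drop n).drop 1 = cs.drop (n + 1) := by
        rw [List.drop_drop]
      rw [← h2, hdrop]
      rfl
    rw [PySem.List.enumerate_cons]
    by_cases h : String.mk [c] = delim
    · have hstep : ((n : Int) + 1) = (((n + 1 : Nat)) : Int) := by push_cast; ring
      rw [List.filter_cons_of_pos (by simpa using h)]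
      simp only [List.map_cons, List.foldl_cons]
      rw [hstep]
      have := ih (n + 1) (n + 1) (out ++ [String.mk (PySem.List.slice cs (some (s : Int)) (some (n : Int)))]) hdrop' (le_refl _)
      rw [this, PySem.List.slice_natCast]
      simp only [Nat.sub_self, List.take_zero, gTok, h, if_pos]
      simp
    · have hstep : ((n : Int) + 1) = (((n + 1 : Nat)) : Int) := by push_cast; ring
      rw [List.filter_cons_of_neg (by simpa using h)]
      rw [hstep]
      have := ih (n + 1) s out hdrop' (by omega)
      rw [this]
      have hgetc : (cs.drop s)[n - s]? = some c := by
        have h1 : (cs.drop s).drop (n - s) = c :: l := by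
          rw [List.drop_drop]
          have hns : s + (n - s) = n := by omega
          rw [hns, hdrop]
        rw [← List.head?_drop, h1]
        rfl
      have htake : (cs.drop s).take (n + 1 - s) = (cs.drop s).take (n - s) ++ [c] := by
        have : n + 1 - s = (n - s) + 1 := by omega
        rw [this, List.take_add_one, hgetc]
        simp
      rw [htake]
      simp [gTok, h]

-- ===== VERDICT (by name: the statement is the Claim_ definition above) =====
theorem split_by_delimiter_spec : Claim_equal_split_by_delimiter := by
  intro text delim _
  unfold Spec_split_by_delimiter split_by_delimiter split_by_delimiter_alt
  rw [foldA_eq_gTok]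
  have h := foldB_eq_gTok delim text.toList text.toList 0 0 [] (by simp) (le_refl 0)
  simpa using h.symm
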